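-- pv_equiv track=rewrite | github.com/AdithyaRajagopalan24/LeetcodeAnswers | 3630-partition-array-for-maximum-xor-and-and/3630-partition-array-for-maximum-xor-and-and.py | maximizeXorAndXor
-- ===== SOURCE A (Python) =====
-- from typing import List
--
-- def maximizeXorAndXor(nums: List[int]) -> int:
--     n = len(nums)
--     res = 0
--     for mask in range(1 << n):
--         s = 0
--         bVal = None
--         candidates = []
--         for i in range(n):
--             if (1 << i) & mask:
--                 if bVal is None:
--                     bVal = nums[i]
--                 else:
--                     bVal &= nums[i]
--             else:
--                 s ^= nums[i]
--                 candidates.append(nums[i])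
--
--         filtered = [x & ~s for x in candidates]
--         basis = []
--         for x in filtered:
--             for b in basis:
--                 x = min(x, x ^ b)
--             if x:
--                 basis.append(x)
--
--         basis.sort(reverse=True)
--         xMax = 0
--         for b in basis:
--             xMax = max(xMax, xMax ^ b)
--
--         bVal = 0 if bVal is None else bVal
--         res = max(res, bVal + s + ((~s & xMax) << 1))
--     return res
-- ===== SOURCE B (Python) =====
-- from typing import List
--
-- def maximizeXorAndXor(nums: List[int]) -> int:
--     # Recursive branch-and-accumulate: each element goes to the AND group or the
--     # XOR group; shared prefixes mean the (bVal, s) state is built once per tree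
--     # node instead of re-scanned per mask.
--     def finish(bOpt, s, cands):
--         basis = []
--         for x in cands:
--             x &= ~s
--             for b in basis:
--                 x = min(x, x ^ b)
--             if x:
--                 basis.append(x)
--         basis.sort(reverse=True)
--         xMax = 0
--         for b in basis:
--             xMax = max(xMax, xMax ^ b)
--         return (0 if bOpt is None else bOpt) + s + ((~s & xMax) << 1)
--
--     def best(rest, bOpt, s, cands):
--         if not rest:
--             return finish(bOpt, s, cands)
--         x = rest[0]
--         tail = rest[1:]
--         withAnd = best(tail, x if bOpt is None else bOpt & x, s, cands)
--         withXor = best(tail, bOpt, s ^ x, cands + [x])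
--         return max(withAnd, withXor)
--
--     return max(0, best(nums, None, 0, []))
-- ===== Notes on version B (the rewrite author's own statement) =====
-- stated objective: alternative
-- what changed: Replaces A's flat 2^n bitmask loop (which rebuilds the AND/XOR/candidate state from scratch with an inner index loop for every mask) by a recursive branch-and-accumulate enumeration that assigns each element to the AND or XOR group and shares the state of common prefixes, fusing the filter step into the basis-building fold; the result is the max of the recursion tree instead of a running max over masks.
import Mathlib
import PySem

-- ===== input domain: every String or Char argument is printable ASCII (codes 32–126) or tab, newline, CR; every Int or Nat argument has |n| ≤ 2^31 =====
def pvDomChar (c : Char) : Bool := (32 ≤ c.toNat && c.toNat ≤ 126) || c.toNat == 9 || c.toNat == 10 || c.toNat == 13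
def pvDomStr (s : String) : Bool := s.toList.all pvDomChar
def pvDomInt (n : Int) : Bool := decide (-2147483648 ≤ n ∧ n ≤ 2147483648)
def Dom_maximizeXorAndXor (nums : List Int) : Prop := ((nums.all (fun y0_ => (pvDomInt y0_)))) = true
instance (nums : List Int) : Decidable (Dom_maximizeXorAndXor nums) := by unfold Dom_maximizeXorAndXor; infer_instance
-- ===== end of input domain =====

-- B replaces A's bitmask enumeration (recomputing the whole AND/XOR state from scratch for each
-- of the 2^n masks) by a recursive branch-and-accumulate traversal that shares common prefixes
-- of the partition (objective: alternative; the per-leaf basis computation is shared work).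

-- ===== PORT A =====
-- leaf computation of A's loop body: filtered list, linear basis, greedy max, final formula
def pvLeafA (s : Int) (bVal : Option Int) (cands : List Int) : Int :=
  let filtered := cands.map (fun x => PySem.Int.band x (Int.not s))
  let basis := filtered.foldl (fun basis x =>
      let x := basis.foldl (fun x b => min x (PySem.Int.bxor x b)) x
      if x ≠ 0 then basis ++ [x] else basis) ([] : List Int)
  let basis := PySem.List.sorted basis (fun b => b) true
  let xMax := basis.foldl (fun xMax b => max xMax (PySem.Int.bxor xMax b)) 0
  (match bVal with | none => 0 | some b => b) + s + (PySem.Int.band (Int.not s) xMax <<< 1)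

def maximizeXorAndXor (nums : List Int) : Int :=
  let n : Int := nums.length
  (PySem.List.pyRange 0 ((1 : Int) <<< nums.length) 1).foldl (fun res mask =>
    -- inner loop over i in range(n); i ≥ 0 always, so 'i.toNat' is exact for '1 << i'
    let st := (PySem.List.pyRange 0 n 1).foldl
      (fun (st : Int × Option Int × List Int) i =>
        if PySem.Int.band (1 <<< i.toNat) mask ≠ 0 then
          match st.2.1 with
          | none   => (st.1, some (PySem.List.pyGetD nums i 0), st.2.2)
          | some b => (st.1, some (PySem.Int.band b (PySem.List.pyGetD nums i 0)), st.2.2)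
        else
          (PySem.Int.bxor st.1 (PySem.List.pyGetD nums i 0), st.2.1,
           st.2.2 ++ [PySem.List.pyGetD nums i 0]))
      ((0 : Int), (none : Option Int), ([] : List Int))
    max res (pvLeafA st.1 st.2.1 st.2.2)) 0

-- ===== PORT B =====
def pvFinish (bOpt : Option Int) (s : Int) (cands : List Int) : Int :=
  let basis := cands.foldl (fun basis x =>
      let x1 := PySem.Int.band x (Int.not s)
      let x2 := basis.foldl (fun y b => min y (PySem.Int.bxor y b)) x1
      if x2 ≠ 0 then basis ++ [x2] else basis) ([] : List Int)
  let basis := PySem.List.sorted basis (fun b => b) true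
  let xMax := basis.foldl (fun acc b => max acc (PySem.Int.bxor acc b)) 0
  (match bOpt with | none => 0 | some b => b) + s + (PySem.Int.band (Int.not s) xMax <<< 1)

def pvBest (rest : List Int) (bOpt : Option Int) (s : Int) (cands : List Int) : Int :=
  match rest with
  | [] => pvFinish bOpt s cands
  | x :: tail =>
      let withAnd := pvBest tail (match bOpt with
                                  | none => some x
                                  | some b => some (PySem.Int.band b x)) s cands
      let withXor := pvBest tail bOpt (PySem.Int.bxor s x) (cands ++ [x])
      max withAnd withXor

def maximizeXorAndXor_alt (nums : List Int) : Int :=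
  max 0 (pvBest nums none 0 [])

-- ===== PRECONDITION & SPEC =====
def Spec_maximizeXorAndXor (nums : List Int) (out : Int) : Prop := out = maximizeXorAndXor_alt nums
instance (nums : List Int) (out : Int) : Decidable (Spec_maximizeXorAndXor nums out) := by unfold Spec_maximizeXorAndXor; infer_instance

-- ===== CLAIM (what is proved, stated in full; the proofs are below) =====
def Claim_equal_maximizeXorAndXor : Prop := ∀ (nums : List Int), Dom_maximizeXorAndXor nums → Spec_maximizeXorAndXor nums (maximizeXorAndXor nums)

-- ===== LEMMAS AND PROOFS =====

-- one step of the AND/XOR state machine: bit set → AND group, bit clear → XOR group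
def pvStep (st : Int × Option Int × List Int) (bit : Bool) (x : Int) :
    Int × Option Int × List Int :=
  if bit then
    match st.2.1 with
    | none => (st.1, some x, st.2.2)
    | some b => (st.1, some (PySem.Int.band b x), st.2.2)
  else (PySem.Int.bxor st.1 x, st.2.1, st.2.2 ++ [x])

-- the state after distributing the elements of l according to the bits of m
def pvState (l : List Int) (m : ℕ) (st : Int × Option Int × List Int) :
    Int × Option Int × List Int :=
  match l with
  | [] => st
  | x :: r => pvState r (m / 2) (pvStep st (m.testBit 0) x)

theorem pvLeaf_eq (s : Int) (bOpt : Option Int) (cands : List Int) :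
    pvLeafA s bOpt cands = pvFinish bOpt s cands := by
  simp [pvLeafA, pvFinish, List.foldl_map]

theorem pvBodyA_eq (nums : List Int) (m : ℕ) :
    (fun (st : Int × Option Int × List Int) (k : ℕ) =>
      if PySem.Int.band (1 <<< ((k : Int)).toNat) ((m : ℕ) : Int) ≠ 0 then
        match st.2.1 with
        | none   => (st.1, some (PySem.List.pyGetD nums (k : Int) 0), st.2.2)
        | some b => (st.1, some (PySem.Int.band b (PySem.List.pyGetD nums (k : Int) 0)), st.2.2)
      else
        (PySem.Int.bxor st.1 (PySem.List.pyGetD nums (k : Int) 0), st.2.1,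
         st.2.2 ++ [PySem.List.pyGetD nums (k : Int) 0]))
    = fun st k => pvStep st (m.testBit k) (nums.getD k 0) := by
  funext st k
  have hb : (PySem.Int.band (1 <<< ((k : Int)).toNat) ((m : ℕ) : Int) ≠ 0) ↔ m.testBit k = true := by
    rw [Int.toNat_natCast, PySem.Int.band_natCast]
    rw [Nat.shiftLeft_eq, one_mul, Nat.two_pow_and]
    cases h : m.testBit k <;> simp
  simp only [pvStep, PySem.List.pyGetD_natCast]
  by_cases h : m.testBit k = true
  · rw [if_pos (hb.mpr h), if_pos (by simpa using h)]
  · rw [if_neg (fun hc => h (hb.mp hc)), if_neg (by simpa using h)]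

theorem pvInnerA (l : List Int) : ∀ (m : ℕ) (st : Int × Option Int × List Int),
    (List.range l.length).foldl (fun st k => pvStep st (m.testBit k) (l.getD k 0)) st
      = pvState l m st := by
  induction l with
  | nil => intro m st; rfl
  | cons x r ih =>
      intro m st
      rw [List.length_cons, List.range_succ_eq_map, List.foldl_cons, List.foldl_map]
      simp only [Nat.testBit_succ, List.getD_cons_succ, List.getD_cons_zero]
      exact ih (m / 2) _

theorem pvRangeNE (N : ℕ) (h : 0 < N) : (Finset.range N).Nonempty :=
  Finset.nonempty_range_iff.mpr (by omega)

theorem pvFoldSup (F : ℕ → Int) : ∀ (N : ℕ) (h : 0 < N) (a : Int),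
    (List.range N).foldl (fun r m => max r (F m)) a
      = max a ((Finset.range N).sup' (pvRangeNE N h) F) := by
  intro N
  induction N with
  | zero => intro h; omega
  | succ N ih =>
      intro _ a
      rcases Nat.eq_zero_or_pos N with hN | hN
      · subst hN
        simp [List.range_succ, Finset.range_one]
      · rw [List.range_succ, List.foldl_append, ih hN a]
        have hr : Finset.range (N + 1) = insert N (Finset.range N) := Finset.range_add_one
        rw [show ((Finset.range (N+1)).sup' (pvRangeNE _ (Nat.succ_pos N)) F)
              = max (F N) ((Finset.range N).sup' (pvRangeNE N hN) F) by
            rw [Finset.sup'_congr (pvRangeNE _ (Nat.succ_pos N)) hr (fun _ _ => rfl),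
              Finset.sup'_insert]]
        simp only [List.foldl_cons, List.foldl_nil]
        rw [max_assoc, max_comm ((Finset.range N).sup' (pvRangeNE N hN) F) (F N)]

theorem pvSplit (N : ℕ) (h : 0 < N) (F : ℕ → Int) :
    (Finset.range (2 * N)).sup' (pvRangeNE _ (by omega)) F
      = max ((Finset.range N).sup' (pvRangeNE N h) (fun q => F (2 * q)))
            ((Finset.range N).sup' (pvRangeNE N h) (fun q => F (2 * q + 1))) := by
  have hset : Finset.range (2 * N)
      = (Finset.range N).image (fun q => 2 * q) ∪ (Finset.range N).image (fun q => 2 * q + 1) := by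
    ext m
    simp only [Finset.mem_union, Finset.mem_image, Finset.mem_range]
    constructor
    · intro hm
      rcases Nat.even_or_odd m with ⟨q, hq⟩ | ⟨q, hq⟩
      · exact Or.inl ⟨q, by omega, by omega⟩
      · exact Or.inr ⟨q, by omega, by omega⟩
    · rintro (⟨q, hq, rfl⟩ | ⟨q, hq, rfl⟩) <;> omega
  have h1 : ((Finset.range N).image (fun q => 2 * q)).Nonempty := ((pvRangeNE N h).image _)
  have h2 : ((Finset.range N).image (fun q => 2 * q + 1)).Nonempty := ((pvRangeNE N h).image _)
  rw [Finset.sup'_congr (pvRangeNE _ (by omega)) hset (fun _ _ => rfl)]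
  rw [Finset.sup'_union h1 h2 F, Finset.sup'_image h1 F, Finset.sup'_image h2 F]
  rfl

theorem pvBest_eq (rest : List Int) : ∀ (bOpt : Option Int) (s : Int) (cands : List Int),
    pvBest rest bOpt s cands
      = (Finset.range (2 ^ rest.length)).sup' (pvRangeNE _ (Nat.two_pow_pos _))
          (fun m =>
            let st := pvState rest m (s, bOpt, cands)
            pvFinish st.2.1 st.1 st.2.2) := by
  induction rest with
  | nil =>
      intro bOpt s cands
      simp [pvBest, pvState, Finset.range_one]
  | cons x tail ih =>
      intro bOpt s cands
      have hlen : (2 : ℕ) ^ (x :: tail).length = 2 * 2 ^ tail.length := by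
        simp [List.length_cons, pow_succ, Nat.mul_comm]
      have hpos : 0 < 2 ^ tail.length := Nat.two_pow_pos _
      rw [show ((Finset.range (2 ^ (x :: tail).length)).sup'
              (pvRangeNE _ (Nat.two_pow_pos _))
              (fun m => let st := pvState (x :: tail) m (s, bOpt, cands)
                        pvFinish st.2.1 st.1 st.2.2))
          = (Finset.range (2 * 2 ^ tail.length)).sup' (pvRangeNE _ (by omega))
              (fun m => let st := pvState (x :: tail) m (s, bOpt, cands)
                        pvFinish st.2.1 st.1 st.2.2) by
        exact Finset.sup'_congr _ (by rw [hlen]) (fun _ _ => rfl)]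
      rw [pvSplit (2 ^ tail.length) hpos]
      have heven : ∀ q : ℕ, pvState (x :: tail) (2 * q) (s, bOpt, cands)
          = pvState tail q (pvStep (s, bOpt, cands) false x) := by
        intro q
        have ht : (2 * q).testBit 0 = false := by
          simp [Nat.testBit_zero]
          try omega
        rw [pvState, ht]
        congr 1
        omega
      have hodd : ∀ q : ℕ, pvState (x :: tail) (2 * q + 1) (s, bOpt, cands)
          = pvState tail q (pvStep (s, bOpt, cands) true x) := by
        intro q
        have ht : (2 * q + 1).testBit 0 = true := by
          simp [Nat.testBit_zero]
          try omega
        rw [pvState, ht]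
        congr 1
        omega
      simp only [heven, hodd]
      have hA : (s, (pvStep (s, bOpt, cands) true x).2.1, cands)
          = pvStep (s, bOpt, cands) true x := by
        cases bOpt <;> rfl
      have hX : pvStep (s, bOpt, cands) false x = (PySem.Int.bxor s x, bOpt, cands ++ [x]) := rfl
      have hL : pvBest (x :: tail) bOpt s cands
          = max (pvBest tail (pvStep (s, bOpt, cands) true x).2.1 s cands)
                (pvBest tail bOpt (PySem.Int.bxor s x) (cands ++ [x])) := by
        cases bOpt <;> rfl
      rw [hL, ih ((pvStep (s, bOpt, cands) true x).2.1) s cands,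
        ih bOpt (PySem.Int.bxor s x) (cands ++ [x]), hA, ← hX]
      exact max_comm _ _

theorem pvA_eq (nums : List Int) :
    maximizeXorAndXor nums
      = max 0 ((Finset.range (2 ^ nums.length)).sup'
          (pvRangeNE _ (Nat.two_pow_pos _))
          (fun m =>
            let st := pvState nums m (0, none, [])
            pvFinish st.2.1 st.1 st.2.2)) := by
  have hlen : ((1 : Int) <<< nums.length) = ((2 ^ nums.length : ℕ) : Int) := by
    have : (1 : Int) <<< nums.length = ((1 <<< nums.length : ℕ) : Int) := by exact_mod_cast rfl
    rw [this, Nat.shiftLeft_eq, one_mul]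
  rw [maximizeXorAndXor]
  simp only [hlen, PySem.List.pyRange_zero_natCast, List.foldl_map]
  simp only [pvBodyA_eq, pvInnerA, pvLeaf_eq]
  exact pvFoldSup _ (2 ^ nums.length) (Nat.two_pow_pos _) 0

-- ===== VERDICT (by name: the statement is the Claim_ definition above) =====
theorem maximizeXorAndXor_spec : Claim_equal_maximizeXorAndXor := by
  intro nums _
  unfold Spec_maximizeXorAndXor maximizeXorAndXor_alt
  rw [pvA_eq, pvBest_eq]
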